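-- pv_equiv track=rewrite | github.com/DyeonPark/CodingTest | Programmers/종이 자르기.py | solution
-- ===== SOURCE A (Python) =====
-- def solution(M, N):
--     answer = 0
--     M_count = 1
--     N_count = 1
--
--     while M > 1:
--         M -= 1
--         M_count += 1
--
--     while N > 1:
--         N -= 1
--         answer += 1
--
--     answer = M_count + ( M_count * answer) - 1
--
--     return answer
-- ===== SOURCE B (Python) =====
-- def solution(M, N):
--     # closed form: cutting an MxN sheet into unit pieces takes M*N-1 cuts;
--     # loops in A leave a dimension at 1 when it starts below 2, hence max(.,1)
--     return max(M, 1) * max(N, 1) - 1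
-- ===== Notes on version B (the rewrite author's own statement) =====
-- stated objective: faster
-- what changed: replaces the two decrement-counting while loops by the closed form max(M,1)*max(N,1)-1
import Mathlib
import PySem

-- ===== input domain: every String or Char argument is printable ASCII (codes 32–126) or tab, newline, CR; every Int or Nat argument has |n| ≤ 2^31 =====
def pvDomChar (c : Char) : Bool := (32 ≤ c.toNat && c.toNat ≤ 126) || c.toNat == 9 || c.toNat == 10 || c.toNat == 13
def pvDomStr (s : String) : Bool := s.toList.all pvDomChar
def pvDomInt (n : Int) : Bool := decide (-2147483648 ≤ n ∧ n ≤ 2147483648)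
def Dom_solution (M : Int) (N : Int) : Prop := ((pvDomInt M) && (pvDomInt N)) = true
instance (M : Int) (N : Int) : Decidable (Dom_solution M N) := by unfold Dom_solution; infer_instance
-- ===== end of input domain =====

-- B replaces A's two counting while-loops by the closed form max(M,1)*max(N,1)-1 (O(1) instead of O(M+N)).


-- ===== PORT A =====
-- first while loop: while M > 1: M -= 1; M_count += 1
def solutionLoopM (M : Int) (M_count : Int) : Int :=
  if M > 1 then solutionLoopM (M - 1) (M_count + 1) else M_count
termination_by M.toNat
decreasing_by omega

-- second while loop: while N > 1: N -= 1; answer += 1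
def solutionLoopN (N : Int) (answer : Int) : Int :=
  if N > 1 then solutionLoopN (N - 1) (answer + 1) else answer
termination_by N.toNat
decreasing_by omega

def solution (M : Int) (N : Int) : Int :=
  let answer := 0
  let M_count := 1
  let M_count := solutionLoopM M M_count
  let answer := solutionLoopN N answer
  M_count + (M_count * answer) - 1

-- ===== PORT B =====
def solution_alt (M : Int) (N : Int) : Int :=
  max M 1 * max N 1 - 1

-- ===== PRECONDITION & SPEC =====
def Spec_solution (M : Int) (N : Int) (out : Int) : Prop := out = solution_alt M N
instance (M : Int) (N : Int) (out : Int) : Decidable (Spec_solution M N out) := by unfold Spec_solution; infer_instance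

-- ===== CLAIM (what is proved, stated in full; the proofs are below) =====
def Claim_equal_solution : Prop := ∀ (M : Int) (N : Int), Dom_solution M N → Spec_solution M N (solution M N)

-- ===== LEMMAS AND PROOFS =====
theorem solutionLoopM_eq (M c : Int) : solutionLoopM M c = max M 1 - 1 + c := by
  induction M, c using solutionLoopM.induct with
  | case1 M c h ih => rw [solutionLoopM]; simp only [if_pos h]; rw [ih]; omega
  | case2 M c h => rw [solutionLoopM]; simp only [if_neg h]; omega

theorem solutionLoopN_eq (N c : Int) : solutionLoopN N c = max N 1 - 1 + c := by
  induction N, c using solutionLoopN.induct with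
  | case1 N c h ih => rw [solutionLoopN]; simp only [if_pos h]; rw [ih]; omega
  | case2 N c h => rw [solutionLoopN]; simp only [if_neg h]; omega

-- ===== VERDICT (by name: the statement is the Claim_ definition above) =====
theorem solution_eval (M N : Int) :
    solution M N = solutionLoopM M 1 + solutionLoopM M 1 * solutionLoopN N 0 - 1 := rfl

theorem solution_spec : Claim_equal_solution := by
  intro M N _
  unfold Spec_solution solution_alt
  rw [solution_eval, solutionLoopM_eq, solutionLoopN_eq]
  ring
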